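-- pv_equiv track=rewrite | github.com/crcollins/chemtools-webapp | chemtools/graph.py | prune_cycles
-- ===== SOURCE A (Python) =====
-- def prune_cycles(cycles, link_nodes):
--     link_set = set(link_nodes)
--     final = []
--     for cycle in cycles:
--         temp = [x in link_set for x in cycle]
--         if sum(temp) <= 2:
--             final.append(cycle)
--             continue
--
--         # [Link1, 0, Link2, 1, 2, Link2, Link1]
--         # goes to [Link1, 0, Link2, Link2, Link1]
--         start = temp.index(True, 1) + 1     # +1 include the second True value
--         end = temp[::-1].index(True, 1) + 1
--         final.append(cycle[:start] + cycle[-end:])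
--     return final
-- ===== SOURCE B (Python) =====
-- def prune_cycles(cycles, link_nodes):
--     link_set = set(link_nodes)
--
--     def head_part(seq):
--         # seq[0], then subsequent elements up to and including the first link node
--         out = [seq[0]]
--         for x in seq[1:]:
--             out.append(x)
--             if x in link_set:
--                 break
--         return out
--
--     final = []
--     for cycle in cycles:
--         if sum(x in link_set for x in cycle) <= 2:
--             final.append(cycle)
--         else:
--             tail = head_part(cycle[::-1])
--             final.append(head_part(cycle) + tail[::-1])
--     return final
-- ===== Notes on version B (the rewrite author's own statement) =====
-- stated objective: alternative
-- what changed: B drops A's boolean mask and index/slice arithmetic entirely: it builds each pruned cycle elementwise with a take-until-inclusive scan (append elements, break at the first link node after position 0) run once forward for the head and once on the reversed cycle for the tail, concatenating the two pieces.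
import Mathlib
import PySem

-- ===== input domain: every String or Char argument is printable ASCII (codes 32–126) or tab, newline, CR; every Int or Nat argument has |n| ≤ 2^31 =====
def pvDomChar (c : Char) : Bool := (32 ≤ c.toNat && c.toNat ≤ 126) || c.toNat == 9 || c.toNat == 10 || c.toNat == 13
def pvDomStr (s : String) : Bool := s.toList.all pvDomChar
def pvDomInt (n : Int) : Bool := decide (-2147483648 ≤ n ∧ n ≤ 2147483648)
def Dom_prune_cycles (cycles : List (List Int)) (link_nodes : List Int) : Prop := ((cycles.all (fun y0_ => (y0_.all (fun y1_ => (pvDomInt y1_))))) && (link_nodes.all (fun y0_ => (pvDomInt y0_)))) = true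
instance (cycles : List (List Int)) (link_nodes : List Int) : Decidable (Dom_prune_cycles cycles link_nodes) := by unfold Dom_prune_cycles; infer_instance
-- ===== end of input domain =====

-- B rebuilds each pruned cycle elementwise with a take-until-inclusive scan (break at the first
-- link node after position 0), run forward for the head and on the reversed cycle for the tail,
-- instead of A's boolean mask with forward/reversed index(True,1) scans and computed slices.


-- ===== PORT A =====
-- 'temp = [x in link_set for x in cycle]'; 'sum(temp)' counts the True entries;
-- 'temp.index(True, 1)' is the first True index ≥ 1, i.e. 1 + idxOf on temp.drop 1 — under the
-- guard sum(temp) > 2 a True at index ≥ 1 exists, so Python never raises here (A is total);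
-- 'temp[::-1]' is temp.reverse (PySem.List.slice?_none_none_neg_one).
def prune_cycles (cycles : List (List Int)) (link_nodes : List Int) : List (List Int) :=
  let link_set := PySem.Set.ofList link_nodes
  cycles.foldl (fun final cycle =>
    let temp := cycle.map (PySem.Set.contains link_set)
    if (temp.count true : Int) ≤ 2 then
      final ++ [cycle]
    else
      let start : Int := (((temp.drop 1).idxOf true : Int) + 1) + 1
      let stop : Int := (((temp.reverse.drop 1).idxOf true : Int) + 1) + 1
      final ++ [PySem.List.slice cycle none (some start) ++
                PySem.List.slice cycle (some (-stop)) none]) []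

-- ===== PORT B =====
-- the 'for x in seq[1:]: out.append(x); if x in link_set: break' loop of head_part
def pvTakeInc (link_set : PySem.Set Int) : List Int → List Int
  | [] => []
  | x :: rest =>
    if PySem.Set.contains link_set x then [x] else x :: pvTakeInc link_set rest

-- head_part(seq) = [seq[0]] followed by the broken loop over seq[1:]; Python raises on an empty
-- seq, but B only calls head_part under the guard sum > 2, where the cycle is nonempty.
def pvHeadPart (link_set : PySem.Set Int) (seq : List Int) : List Int :=
  match seq with
  | [] => []
  | x :: rest => x :: pvTakeInc link_set rest

def prune_cycles_alt (cycles : List (List Int)) (link_nodes : List Int) : List (List Int) :=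
  let link_set := PySem.Set.ofList link_nodes
  cycles.foldl (fun final cycle =>
    if ((cycle.countP (fun x => PySem.Set.contains link_set x)) : Int) ≤ 2 then
      final ++ [cycle]
    else
      let tail := pvHeadPart link_set cycle.reverse
      final ++ [pvHeadPart link_set cycle ++ tail.reverse]) []

-- ===== PRECONDITION & SPEC =====
def Spec_prune_cycles (cycles : List (List Int)) (link_nodes : List Int) (out : List (List Int)) : Prop := out = prune_cycles_alt cycles link_nodes
instance (cycles : List (List Int)) (link_nodes : List Int) (out : List (List Int)) : Decidable (Spec_prune_cycles cycles link_nodes out) := by unfold Spec_prune_cycles; infer_instance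

-- ===== CLAIM (what is proved, stated in full; the proofs are below) =====
def Claim_equal_prune_cycles : Prop := ∀ (cycles : List (List Int)) (link_nodes : List Int), Dom_prune_cycles cycles link_nodes → Spec_prune_cycles cycles link_nodes (prune_cycles cycles link_nodes)

-- ===== LEMMAS AND PROOFS =====

-- the guard counts agree: count true on the mask = countP on the cycle
lemma pv_count_mask (f : Int → Bool) (l : List Int) : (l.map f).count true = l.countP f := by
  induction l with
  | nil => rfl
  | cons x l ih =>
    by_cases h : f x = true <;> simp [h, ih]

-- the broken loop takes exactly up to (and including) the first link element
lemma pvTakeInc_eq (S : PySem.Set Int) (l : List Int) :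
    pvTakeInc S l = l.take ((l.map S.contains).idxOf true + 1) := by
  induction l with
  | nil => simp [pvTakeInc]
  | cons x l ih =>
    simp only [pvTakeInc, List.map_cons, List.idxOf_cons]
    cases hx : PySem.Set.contains S x
    · simp [ih]
    · simp

-- head_part is a take up to (and including) the first link index ≥ 1
lemma pvHeadPart_eq (S : PySem.Set Int) (l : List Int) (h : l ≠ []) :
    pvHeadPart S l = l.take ((((l.map S.contains).drop 1).idxOf true) + 2) := by
  cases l with
  | nil => exact absurd rfl h
  | cons x rest => simp [pvHeadPart, pvTakeInc_eq, List.take_succ_cons]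

-- a count ≥ 3 forces a true strictly inside, so the idxOf lands strictly before the end
lemma pv_idx_lt (t : List Bool) (h : 3 ≤ t.count true) :
    (t.drop 1).idxOf true + 2 ≤ t.length := by
  cases t with
  | nil => simp at h
  | cons b r =>
    have hr : 1 ≤ r.count true := by
      cases b <;> simp at h <;> omega
    have hmem : true ∈ r := List.count_pos_iff.mp (by omega)
    have := List.idxOf_lt_length_of_mem hmem
    simp only [List.drop_succ_cons, List.drop_zero, List.length_cons]
    omega

-- ===== VERDICT (by name: the statement is the Claim_ definition above) =====
theorem prune_cycles_spec : Claim_equal_prune_cycles := by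
  intro cycles link_nodes _
  unfold Spec_prune_cycles prune_cycles prune_cycles_alt
  apply List.foldl_ext
  intro final c hc
  set S := PySem.Set.ofList link_nodes with hS
  have hcount : ((c.map S.contains).count true : Int) = (c.countP (fun x => S.contains x) : Int) := by
    rw [pv_count_mask]
  by_cases hcond : ((c.map S.contains).count true : Int) ≤ 2
  · rw [if_pos hcond, if_pos (by omega : ((c.countP (fun x => S.contains x)) : Int) ≤ 2)]
  · rw [if_neg hcond, if_neg (by omega : ¬((c.countP (fun x => S.contains x)) : Int) ≤ 2)]
    have h3 : 3 ≤ (c.map S.contains).count true := by omega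
    have hne : c ≠ [] := by
      intro hnil; rw [hnil] at h3; simp at h3
    have hlen : c.length = (c.map S.contains).length := by simp
    -- head piece
    have hhead : PySem.List.slice c none (some ((((c.map S.contains).drop 1).idxOf true : Int) + 1 + 1))
        = pvHeadPart S c := by
      rw [show ((((c.map S.contains).drop 1).idxOf true : Int) + 1 + 1)
            = (((((c.map S.contains).drop 1).idxOf true) + 2 : Nat) : Int) by push_cast; ring,
          PySem.List.slice_to_natCast, pvHeadPart_eq S c hne]
    -- tail piece
    have hrev3 : 3 ≤ (c.reverse.map S.contains).count true := by
      rw [show c.reverse.map S.contains = (c.map S.contains).reverse by simp,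
          List.count_reverse]
      exact h3
    have hrne : c.reverse ≠ [] := by simpa using hne
    have hidx := pv_idx_lt (c.reverse.map S.contains) hrev3
    rw [List.length_map, List.length_reverse] at hidx
    have htail : PySem.List.slice c
          (some (-((((c.map S.contains).reverse.drop 1).idxOf true : Int) + 1 + 1))) none
        = (pvHeadPart S c.reverse).reverse := by
      rw [show (c.map S.contains).reverse = c.reverse.map S.contains by simp]
      set k : Nat := (((c.reverse.map S.contains).drop 1).idxOf true) + 2 with hk
      have hk1 : 0 < k := by omega
      rw [show ((((c.reverse.map S.contains).drop 1).idxOf true : Int) + 1 + 1) = (k : Int) by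
            rw [hk]; push_cast; ring,
          PySem.List.slice_from_neg_natCast c k hk1,
          pvHeadPart_eq S c.reverse hrne, ← hk]
      -- c.drop (c.length - k) = (c.reverse.take k).reverse
      rw [← List.reverse_reverse (c.drop (c.length - k))]
      congr 1
      rw [List.reverse_drop]
      congr 1
      omega
    simp only [hhead, htail]
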